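-- pv_equiv track=rewrite | github.com/oltionzefi/daily-coding-problem | problem_2/problem_2.py | production
-- ===== SOURCE A (Python) =====
-- def production(array, actual_key):
--     prod = 1
--     for key, value in enumerate(array):
--         if key == actual_key:
--             prod *= 1
--         else:
--             prod *= value
--
--     return prod
-- ===== SOURCE B (Python) =====
-- def production(array, actual_key):
--     # Division-based: one pass over values (no index test) collecting the product
--     # of the nonzero elements and the number of zeros; then remove the keyed
--     # element arithmetically (exact division, or decrementing the zero count).
--     p = 1
--     zeros = 0
--     for v in array:
--         if v == 0:
--             zeros += 1
--         else:
--             p *= v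
--     if 0 <= actual_key < len(array):
--         v = array[actual_key]
--         if v == 0:
--             zeros -= 1
--         else:
--             p //= v
--     return 0 if zeros > 0 else p
-- ===== Notes on version B (the rewrite author's own statement) =====
-- stated objective: alternative
-- what changed: Replaces A's per-index skip loop (compare every enumerate index with the key) by a division-based algorithm: one index-free pass collects the product of the nonzero elements and the zero count, then the keyed element is removed arithmetically by one exact division (or by decrementing the zero count when it is zero), returning 0 iff a zero remains.
import Mathlib
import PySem

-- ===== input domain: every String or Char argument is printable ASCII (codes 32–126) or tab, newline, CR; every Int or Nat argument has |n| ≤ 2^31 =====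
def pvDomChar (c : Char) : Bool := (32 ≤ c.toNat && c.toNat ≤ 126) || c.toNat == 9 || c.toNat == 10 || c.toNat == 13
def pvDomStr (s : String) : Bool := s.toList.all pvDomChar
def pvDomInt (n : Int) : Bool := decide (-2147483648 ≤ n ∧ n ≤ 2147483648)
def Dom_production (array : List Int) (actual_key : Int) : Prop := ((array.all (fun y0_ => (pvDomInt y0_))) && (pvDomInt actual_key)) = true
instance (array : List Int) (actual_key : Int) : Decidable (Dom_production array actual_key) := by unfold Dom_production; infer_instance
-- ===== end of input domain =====

-- B replaces A's per-index skip loop by a division-based algorithm: one index-free pass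
-- collects the product of the nonzero elements and the zero count, then the keyed element
-- is removed arithmetically (exact division, or decrementing the zero count).

-- ===== PORT A =====
def production (array : List Int) (actual_key : Int) : Int :=
  (PySem.List.enumerate array 0).foldl
    (fun prod kv => if kv.1 = actual_key then prod * 1 else prod * kv.2) 1

-- ===== PORT B =====
def production_alt (array : List Int) (actual_key : Int) : Int :=
  -- one pass: (product of nonzero elements, number of zeros)
  let st := array.foldl
    (fun (st : Int × Int) v => if v = 0 then (st.1, st.2 + 1) else (st.1 * v, st.2)) (1, 0)
  let st2 :=
    if 0 ≤ actual_key ∧ actual_key < (array.length : Int) then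
      let v := (PySem.List.pyGet? array actual_key).getD 0  -- in range by the guard
      if v = 0 then (st.1, st.2 - 1) else (PySem.Int.floordiv st.1 v, st.2)
    else st
  if st2.2 > 0 then 0 else st2.1

-- ===== PRECONDITION & SPEC =====
def Spec_production (array : List Int) (actual_key : Int) (out : Int) : Prop := out = production_alt array actual_key
instance (array : List Int) (actual_key : Int) (out : Int) : Decidable (Spec_production array actual_key out) := by unfold Spec_production; infer_instance

-- ===== CLAIM (what is proved, stated in full; the proofs are below) =====
def Claim_equal_production : Prop := ∀ (array : List Int) (actual_key : Int), Dom_production array actual_key → Spec_production array actual_key (production array actual_key)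

-- ===== LEMMAS AND PROOFS =====

-- product of a list, as an accumulation loop (characterises A's partial products)
def prodLoop (xs : List Int) : Int := xs.foldl (fun p v => p * v) 1

-- product of the nonzero elements (characterises B's first accumulator)
def pnz (xs : List Int) : Int := xs.foldl (fun p v => if v = 0 then p else p * v) 1

theorem prodLoop_cons (x : Int) (xs : List Int) : prodLoop (x :: xs) = x * prodLoop xs := by
  have h : ∀ (l : List Int) (p : Int), l.foldl (fun p v => p * v) p = p * prodLoop l := by
    intro l
    induction l with
    | nil => intro p; simp [prodLoop]
    | cons y ys ih =>
      intro p
      simp only [List.foldl_cons, prodLoop] at *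
      rw [ih (p * y), ih (1 * y)]
      ring
  have := h xs (1 * x)
  simpa [prodLoop] using this

theorem pnz_cons (x : Int) (xs : List Int) :
    pnz (x :: xs) = (if x = 0 then 1 else x) * pnz xs := by
  have h : ∀ (l : List Int) (p : Int),
      l.foldl (fun p v => if v = 0 then p else p * v) p = p * pnz l := by
    intro l
    induction l with
    | nil => intro p; simp [pnz]
    | cons y ys ih =>
      intro p
      simp only [List.foldl_cons, pnz] at *
      by_cases hy : y = 0
      · simp only [hy, if_true] at *
        rw [ih p]
      · simp only [hy, if_false] at *
        rw [ih (p * y), ih (1 * y)]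
        ring
  by_cases hx : x = 0
  · simpa [pnz, hx] using h xs 1
  · simpa [pnz, hx] using h xs (1 * x)

theorem pnz_append (a b : List Int) : pnz (a ++ b) = pnz a * pnz b := by
  induction a with
  | nil => simp [pnz]
  | cons x xs ih =>
    rw [List.cons_append, pnz_cons, pnz_cons, ih]
    ring

theorem prodLoop_char (xs : List Int) :
    prodLoop xs = if 0 < xs.count 0 then 0 else pnz xs := by
  induction xs with
  | nil => simp [prodLoop, pnz]
  | cons x l ih =>
    rw [prodLoop_cons, pnz_cons, ih, List.count_cons]
    by_cases hx : x = 0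
    · simp [hx]
    · have hx' : ((0 : Int) == x) = false := by simp [Ne.symm hx]
      by_cases hl : 0 < l.count 0 <;> simp [hx, hx', hl]

-- B's accumulation pass computes (pnz, zero count)
theorem pairFold (xs : List Int) : ∀ (p z : Int),
    xs.foldl (fun (st : Int × Int) v => if v = 0 then (st.1, st.2 + 1) else (st.1 * v, st.2)) (p, z)
      = (p * pnz xs, z + (xs.count 0 : Int)) := by
  induction xs with
  | nil => intro p z; simp [pnz]
  | cons x l ih =>
    intro p z
    by_cases hx : x = 0
    · simp only [List.foldl_cons, hx, if_true, ih, pnz_cons, List.count_cons, Prod.mk.injEq]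
      refine ⟨by ring, by simp; push_cast; ring⟩
    · simp only [List.foldl_cons, hx, if_false, ih, pnz_cons, List.count_cons, Prod.mk.injEq]
      refine ⟨by ring, by simp [hx]⟩

-- A's loop: product of all elements except index k (product of everything when k is out of range)
theorem foldA (xs : List Int) (k : Int) :
    ∀ (s p : Int),
      (PySem.List.enumerate xs s).foldl
        (fun prod kv => if kv.1 = k then prod * 1 else prod * kv.2) p
      = if s ≤ k ∧ k < s + (xs.length : Int) then
          p * prodLoop (xs.take (k - s).toNat) * prodLoop (xs.drop ((k - s).toNat + 1))
        else p * prodLoop xs := by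
  induction xs with
  | nil =>
    intro s p
    have hn : ¬ (s ≤ k ∧ k < s + ((([] : List Int)).length : Int)) := by
      simp only [List.length_nil, Int.natCast_zero, add_zero]; omega
    rw [PySem.List.enumerate_nil, List.foldl_nil, if_neg hn]
    simp [prodLoop]
  | cons x xs ih =>
    intro s p
    rw [PySem.List.enumerate_cons, List.foldl_cons, ih (s + 1)]
    by_cases hk : s = k
    · subst hk
      have h1 : ¬ (s + 1 ≤ s ∧ s < s + 1 + (xs.length : Int)) := by omega
      have h2 : s ≤ s ∧ s < s + ((x :: xs).length : Int) := by
        constructor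
        · omega
        · simp only [List.length_cons]; push_cast; omega
      rw [if_neg h1, if_pos h2]
      have e0 : (s - s).toNat = 0 := by omega
      rw [e0, List.take_zero, List.drop_succ_cons, List.drop_zero]
      simp [prodLoop]
    · have hne : ¬ ((s, x).1 = k) := hk
      simp only [hne, if_false]
      by_cases hin : s + 1 ≤ k ∧ k < s + 1 + (xs.length : Int)
      · have hout : s ≤ k ∧ k < s + ((x :: xs).length : Int) := by
          simp only [List.length_cons] at *; push_cast at *; omega
        have htn : (k - s).toNat = (k - (s + 1)).toNat + 1 := by omega
        rw [if_pos hin, if_pos hout, htn]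
        rw [List.take_succ_cons, List.drop_succ_cons, prodLoop_cons]
        ring
      · have hout : ¬ (s ≤ k ∧ k < s + ((x :: xs).length : Int)) := by
          simp only [List.length_cons] at *; push_cast at *; omega
        rw [if_neg hin, if_neg hout, prodLoop_cons]
        ring

-- ===== VERDICT (by name: the statement is the Claim_ definition above) =====
theorem production_spec : Claim_equal_production := by
  intro array k _
  unfold Spec_production production production_alt
  rw [foldA array k 0 1]
  simp only [pairFold array 1 0, one_mul, zero_add]
  by_cases h : 0 ≤ k ∧ k < (array.length : Int)
  · simp only [eq_true h, if_true]
    have hk0 : (k - 0).toNat = k.toNat := by omega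
    rw [hk0]
    rw [PySem.List.pyGet?_eq_some_getElem array h.1 h.2]
    set v := array[k.toNat] with hv
    set t := array.take k.toNat with ht
    set d := array.drop (k.toNat + 1) with hd
    have hdecomp : array = t ++ v :: d := by
      rw [ht, hd, hv, List.getElem_cons_drop, List.take_append_drop]
    have hp : pnz array = pnz t * ((if v = 0 then 1 else v) * pnz d) := by
      rw [hdecomp, pnz_append, pnz_cons]
    have hc : (array.count 0 : Int)
        = ((t.count 0 : Int) + if v = 0 then 1 else 0) + (d.count 0 : Int) := by
      rw [hdecomp, List.count_append, List.count_cons]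
      by_cases hz : v = 0 <;> simp [hz, beq_iff_eq] <;> push_cast <;> ring
    rw [prodLoop_char, prodLoop_char]
    simp only [Option.getD_some]
    by_cases hz : v = 0
    · rw [hp, hc]
      simp only [hz, if_true, one_mul]
      split_ifs <;> push_cast at * <;> first | (exfalso; omega) | ring
    · rw [hp, hc]
      simp only [hz, if_false, add_zero]
      split_ifs <;> push_cast at *
      all_goals try (exfalso; omega)
      all_goals try ring
      all_goals unfold PySem.Int.floordiv
      all_goals exact (Int.mul_fdiv_cancel (pnz t * pnz d) hz).symm
  · simp only [eq_false h, if_false]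
    rw [prodLoop_char]
    split_ifs <;> push_cast at * <;> first | (exfalso; omega) | rfl
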